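-- pv_equiv track=rewrite | github.com/hikaru-212/etl_learning_journey | coding_training/basic/moduleD_iteration_enumeration/drills/lowlevel.py | run_P4_parity_and_sign
-- ===== SOURCE A (Python) =====
-- def run_P4_parity_and_sign(nums: list[int]) -> tuple[bool, bool]:
--     #手動判斷是否有任何偶數
--     any_even = False
--     for x in nums:
--         if x % 2 == 0:
--             any_even = True
--             break
--
--     #手動判斷是否全部正數
--     all_positive = True
--     for x in nums:
--         if x <= 0:
--             all_positive = False
--             break
--     return (any_even, all_positive)
-- ===== SOURCE B (Python) =====
-- def run_P4_parity_and_sign(nums: list[int]) -> tuple[bool, bool]: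
--     any_even = False
--     all_positive = True
--     for x in nums:
--         if x % 2 == 0:
--             any_even = True
--         if x <= 0:
--             all_positive = False
--     return (any_even, all_positive)
-- ===== Notes on version B (the rewrite author's own statement) =====
-- stated objective: simpler
-- what changed: Replaces A's two separate early-break scans with a single full pass that maintains both flags (any_even, all_positive) in one loop.
import Mathlib
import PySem

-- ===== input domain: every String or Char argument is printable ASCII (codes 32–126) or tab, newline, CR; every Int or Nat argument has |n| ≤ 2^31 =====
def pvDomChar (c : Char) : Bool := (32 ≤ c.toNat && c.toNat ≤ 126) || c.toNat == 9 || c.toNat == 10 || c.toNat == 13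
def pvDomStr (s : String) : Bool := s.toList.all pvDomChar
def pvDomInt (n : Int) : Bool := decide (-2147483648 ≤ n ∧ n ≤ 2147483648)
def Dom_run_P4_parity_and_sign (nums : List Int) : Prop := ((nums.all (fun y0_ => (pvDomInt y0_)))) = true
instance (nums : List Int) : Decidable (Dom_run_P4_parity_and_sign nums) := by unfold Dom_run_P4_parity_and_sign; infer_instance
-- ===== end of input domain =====

-- B fuses A's two early-break scans into one full pass maintaining both flags (objective: simpler).
-- ===== PORT A =====
-- loop 1 of A: 'break' on the first even element
def pvAnyEven : List Int → Bool
  | [] => false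
  | x :: rest => if PySem.Int.mod x 2 = 0 then true else pvAnyEven rest

-- loop 2 of A: 'break' on the first non-positive element
def pvAllPositive : List Int → Bool
  | [] => true
  | x :: rest => if x ≤ 0 then false else pvAllPositive rest

def run_P4_parity_and_sign (nums : List Int) : Bool × Bool :=
  (pvAnyEven nums, pvAllPositive nums)

-- ===== PORT B =====
-- B: one full pass maintaining both flags
def run_P4_parity_and_sign_alt (nums : List Int) : Bool × Bool :=
  nums.foldl (fun (acc : Bool × Bool) x =>
    ((if PySem.Int.mod x 2 = 0 then true else acc.1),
     (if x ≤ 0 then false else acc.2))) (false, true)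

-- ===== PRECONDITION & SPEC =====
def Spec_run_P4_parity_and_sign (nums : List Int) (out : Bool × Bool) : Prop := out = run_P4_parity_and_sign_alt nums
instance (nums : List Int) (out : Bool × Bool) : Decidable (Spec_run_P4_parity_and_sign nums out) := by unfold Spec_run_P4_parity_and_sign; infer_instance

-- ===== CLAIM (what is proved, stated in full; the proofs are below) =====
def Claim_equal_run_P4_parity_and_sign : Prop := ∀ (nums : List Int), Dom_run_P4_parity_and_sign nums → Spec_run_P4_parity_and_sign nums (run_P4_parity_and_sign nums)

-- ===== LEMMAS AND PROOFS =====

-- ===== VERDICT (by name: the statement is the Claim_ definition above) =====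
theorem pv_fold_eq (nums : List Int) (a p : Bool) :
    nums.foldl (fun (acc : Bool × Bool) x =>
      ((if PySem.Int.mod x 2 = 0 then true else acc.1),
       (if x ≤ 0 then false else acc.2))) (a, p)
    = ((a || pvAnyEven nums), (p && pvAllPositive nums)) := by
  induction nums generalizing a p with
  | nil => simp [pvAnyEven, pvAllPositive]
  | cons x rest ih =>
    simp only [List.foldl_cons, ih, pvAnyEven, pvAllPositive]
    by_cases h1 : PySem.Int.mod x 2 = 0 <;> by_cases h2 : x ≤ 0 <;>
      cases a <;> cases p <;> simp [h1, h2]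

theorem run_P4_parity_and_sign_spec : Claim_equal_run_P4_parity_and_sign := by
  intro nums _
  unfold Spec_run_P4_parity_and_sign run_P4_parity_and_sign run_P4_parity_and_sign_alt
  rw [pv_fold_eq]
  simp
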